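-- pv_equiv track=rewrite | github.com/pepi99/big5_predictions | models/scores.py | lengths
-- ===== SOURCE A (Python) =====
-- def lengths(X):
--     d = {100: 0, 1000: 0, 5000: 0, 10000: 0, 20000: 0}
--     for text in X:
--         l = len(text.split())
--         for k in d.keys():
--             if l >= k:
--                 d[k] += 1
--             else:
--                 break
--     return d
-- ===== SOURCE B (Python) =====
-- import bisect
--
--
-- def lengths(X):
--     ls = sorted(len(t.split()) for t in X)
--     n = len(ls)
--     return {k: n - bisect.bisect_left(ls, k) for k in (100, 1000, 5000, 10000, 20000)}
-- ===== Notes on version B (the rewrite author's own statement) =====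
-- stated objective: alternative
-- what changed: B computes all word counts once, sorts them, and answers each of the five thresholds by binary search (bisect_left) on the sorted counts, instead of A's per-text scan over the dict's thresholds with a break and in-place increments.
import Mathlib
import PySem

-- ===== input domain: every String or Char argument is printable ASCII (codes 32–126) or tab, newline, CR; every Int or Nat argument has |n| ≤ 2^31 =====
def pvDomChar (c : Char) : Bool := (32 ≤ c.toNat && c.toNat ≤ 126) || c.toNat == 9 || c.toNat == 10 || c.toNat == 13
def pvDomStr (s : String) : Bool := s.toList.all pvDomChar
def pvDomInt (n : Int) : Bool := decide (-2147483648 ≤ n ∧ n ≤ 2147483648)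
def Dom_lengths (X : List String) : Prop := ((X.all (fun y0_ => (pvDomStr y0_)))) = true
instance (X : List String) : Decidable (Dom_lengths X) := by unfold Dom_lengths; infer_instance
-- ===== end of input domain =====

-- B sorts the per-text word counts once and answers each threshold by binary search, instead of A's per-text scan over the dict's thresholds with a break.

-- ===== PORT A =====
-- inner loop 'for k in d.keys(): if l >= k: d[k] += 1 else: break' (keys snapshot is safe: the loop never changes keys)
def lengthsInner (ks : List Int) (l : Int) (d : PySem.Dict Int Int) : PySem.Dict Int Int :=
  match ks with
  | [] => d
  | k :: ks' => if l ≥ k then lengthsInner ks' l (d.modify k 0 (· + 1)) else d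

def lengthsStep (d : PySem.Dict Int Int) (text : String) : PySem.Dict Int Int :=
  let l := PySem.List.len (PySem.Str.split₀ text)
  lengthsInner d.keys l d

def lengths (X : List String) : List (Int × Int) :=
  (X.foldl lengthsStep
    (PySem.Dict.ofList [(100, 0), (1000, 0), (5000, 0), (10000, 0), (20000, 0)])).items

-- ===== PORT B =====
def lengths_alt (X : List String) : List (Int × Int) :=
  let ls : List Int := PySem.List.sorted (X.map (fun t => PySem.List.len (PySem.Str.split₀ t))) (fun x => x) false
  let n : Int := PySem.List.len ls
  [(100 : Int), 1000, 5000, 10000, 20000].map (fun k => (k, n - (PySem.List.bisectLeft ls k : Int)))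

-- ===== PRECONDITION & SPEC =====
def Spec_lengths (X : List String) (out : List (Int × Int)) : Prop := out = lengths_alt X
instance (X : List String) (out : List (Int × Int)) : Decidable (Spec_lengths X out) := by unfold Spec_lengths; infer_instance

-- ===== CLAIM (what is proved, stated in full; the proofs are below) =====
def Claim_equal_lengths : Prop := ∀ (X : List String), Dom_lengths X → Spec_lengths X (lengths X)

-- ===== LEMMAS AND PROOFS =====

def pvWl (t : String) : Int := PySem.List.len (PySem.Str.split₀ t)

def pvCnt (X : List String) (k : Int) : Int := (X.countP (fun t => decide (k ≤ pvWl t)) : Int)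

lemma pvInner_items (l a b c e f : Int) :
    lengthsInner [100, 1000, 5000, 10000, 20000] l
      (PySem.Dict.mk [(100, a), (1000, b), (5000, c), (10000, e), (20000, f)])
    = PySem.Dict.mk [(100, if 100 ≤ l then a + 1 else a),
                     (1000, if 1000 ≤ l then b + 1 else b),
                     (5000, if 5000 ≤ l then c + 1 else c),
                     (10000, if 10000 ≤ l then e + 1 else e),
                     (20000, if 20000 ≤ l then f + 1 else f)] := by
  by_cases h1 : (100:Int) ≤ l <;> by_cases h2 : (1000:Int) ≤ l <;>
    by_cases h3 : (5000:Int) ≤ l <;> by_cases h4 : (10000:Int) ≤ l <;>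
    by_cases h5 : (20000:Int) ≤ l <;>
    first
      | omega
      | simp_all [lengthsInner, PySem.Dict.modify, PySem.Dict.insert, PySem.Dict.contains,
          PySem.Dict.getD, PySem.Dict.get?] <;> split_ifs <;> first | rfl | omega

lemma pvCnt_cons (x : String) (xs : List String) (k : Int) :
    pvCnt (x :: xs) k = (if k ≤ pvWl x then 1 else 0) + pvCnt xs k := by
  simp only [pvCnt, List.countP_cons]
  split_ifs with h <;> simp_all <;> ring

lemma pvStep (a b c e f : Int) (x : String) :
    lengthsStep (PySem.Dict.mk [(100, a), (1000, b), (5000, c), (10000, e), (20000, f)]) x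
    = PySem.Dict.mk [(100, if 100 ≤ pvWl x then a + 1 else a),
                     (1000, if 1000 ≤ pvWl x then b + 1 else b),
                     (5000, if 5000 ≤ pvWl x then c + 1 else c),
                     (10000, if 10000 ≤ pvWl x then e + 1 else e),
                     (20000, if 20000 ≤ pvWl x then f + 1 else f)] := by
  have hk : (PySem.Dict.mk [((100:Int), a), (1000, b), (5000, c), (10000, e), (20000, f)]).keys
      = [100, 1000, 5000, 10000, 20000] := by
    simp [PySem.Dict.keys]
  simp only [lengthsStep, hk]
  exact pvInner_items (pvWl x) a b c e f

lemma pvFoldA (X : List String) (a b c e f : Int) :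
    (X.foldl lengthsStep
      (PySem.Dict.mk [(100, a), (1000, b), (5000, c), (10000, e), (20000, f)]))
    = PySem.Dict.mk [(100, a + pvCnt X 100), (1000, b + pvCnt X 1000), (5000, c + pvCnt X 5000),
                     (10000, e + pvCnt X 10000), (20000, f + pvCnt X 20000)] := by
  induction X generalizing a b c e f with
  | nil => simp [pvCnt]
  | cons x xs ih =>
    rw [List.foldl_cons, pvStep, ih]
    simp only [pvCnt_cons]
    split_ifs <;> simp [add_assoc]

lemma pvAlt_count (X : List String) (k : Int) :
    PySem.List.len (PySem.List.sorted (X.map pvWl) (fun x => x) false)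
      - (PySem.List.bisectLeft (PySem.List.sorted (X.map pvWl) (fun x => x) false) k : Int)
    = pvCnt X k := by
  set L := X.map pvWl with hL
  set ls := PySem.List.sorted L (fun x => x) false with hls
  have hpw : ls.Pairwise (· ≤ ·) := by
    have h := PySem.List.sorted_pairwise L (fun x => x)
    simpa [hls] using h
  obtain ⟨hle, hlt, hge⟩ := PySem.List.bisectLeft_spec ls k hpw
  set i := PySem.List.bisectLeft ls k with hi
  have hcount : ls.countP (fun x => decide (k ≤ x)) = ls.length - i := by
    have hsplit : ls.take i ++ ls.drop i = ls := List.take_append_drop i ls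
    have h1 : (ls.take i).countP (fun x => decide (k ≤ x)) = 0 := by
      rw [List.countP_eq_zero]
      intro x hx
      obtain ⟨j, hj, hjx⟩ := List.getElem_of_mem hx
      have hj' : j < ls.length := lt_of_lt_of_le hj (by simp [List.length_take])
      have hji : j < i := lt_of_lt_of_le hj (by simp [List.length_take])
      have := hlt j hj' hji
      rw [List.getElem_take] at hjx
      simp only [← hjx]
      simpa using not_le_of_gt this
    have h2 : (ls.drop i).countP (fun x => decide (k ≤ x)) = (ls.drop i).length := by
      rw [List.countP_eq_length]
      intro x hx
      obtain ⟨j, hj, hjx⟩ := List.getElem_of_mem hx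
      have hj' : i + j < ls.length := by
        have := hj; simp [List.length_drop] at this; omega
      have := hge (i + j) hj' (Nat.le_add_right i j)
      rw [List.getElem_drop] at hjx
      simp only [← hjx]
      simpa using this
    calc ls.countP (fun x => decide (k ≤ x))
        = (ls.take i ++ ls.drop i).countP (fun x => decide (k ≤ x)) := by rw [hsplit]
      _ = (ls.take i).countP (fun x => decide (k ≤ x))
            + (ls.drop i).countP (fun x => decide (k ≤ x)) := List.countP_append ..
      _ = ls.length - i := by rw [h1, h2, List.length_drop]; omega
  have hXc : X.countP (fun t => decide (k ≤ pvWl t)) = ls.length - i := by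
    have hperm : ls.Perm L := PySem.List.sorted_perm L (fun x => x) false
    have h3 : L.countP (fun x => decide (k ≤ x)) = ls.length - i := by
      rw [← hperm.countP_eq (fun x => decide (k ≤ x))]
      exact hcount
    rw [← h3, hL, List.countP_map]
    rfl
  simp only [pvCnt, PySem.List.len_eq, hXc]
  omega

-- ===== VERDICT (by name: the statement is the Claim_ definition above) =====
theorem lengths_spec : Claim_equal_lengths := by
  intro X _
  unfold Spec_lengths lengths lengths_alt
  have h0 : (PySem.Dict.ofList [((100 : Int), (0 : Int)), (1000, 0), (5000, 0), (10000, 0), (20000, 0)])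
      = PySem.Dict.mk [(100, 0), (1000, 0), (5000, 0), (10000, 0), (20000, 0)] := by decide
  rw [h0, pvFoldA]
  simp only [List.map]
  rw [show (fun t => PySem.List.len (PySem.Str.split₀ t)) = pvWl from rfl]
  rw [pvAlt_count X 100, pvAlt_count X 1000, pvAlt_count X 5000, pvAlt_count X 10000, pvAlt_count X 20000]
  simp
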